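-- pv_equiv track=rewrite | github.com/jbonni/optimizedFrameSelection | dataHandler.py | createIterableShape
-- ===== SOURCE A (Python) =====
-- def createIterableShape(shape):
--         b = []
--         for index, data in enumerate(shape):
--             if index == 0:
--                 b.append([0,data])
--             else:
--                 b.append([b[index-1][1],b[index-1][1]+data])
--         return b
-- ===== SOURCE B (Python) =====
-- def createIterableShape(shape):
--     return [[sum(shape[:i]), sum(shape[:i + 1])] for i in range(len(shape))]
-- ===== Notes on version B (the rewrite author's own statement) =====
-- stated objective: simpler
-- what changed: B computes each interval independently by a closed form over the index -- pair i is [sum(shape[:i]), sum(shape[:i+1])] -- a one-line stateless comprehension of slice sums instead of A's stateful loop that reads the previously appended pair's endpoint with a special case for index 0; B is O(n^2) while A is O(n).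
import Mathlib
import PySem

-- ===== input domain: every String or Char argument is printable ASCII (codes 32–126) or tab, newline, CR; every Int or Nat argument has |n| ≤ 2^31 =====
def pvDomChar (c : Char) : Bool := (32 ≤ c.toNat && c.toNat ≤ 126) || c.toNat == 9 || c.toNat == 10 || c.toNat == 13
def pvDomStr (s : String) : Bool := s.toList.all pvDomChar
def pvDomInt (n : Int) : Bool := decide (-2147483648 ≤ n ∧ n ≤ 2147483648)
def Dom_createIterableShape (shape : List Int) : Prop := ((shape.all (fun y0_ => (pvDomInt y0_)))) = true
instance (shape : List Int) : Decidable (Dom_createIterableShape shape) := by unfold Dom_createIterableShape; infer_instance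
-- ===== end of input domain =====

-- B replaces A's stateful self-referential append loop by a stateless closed form: interval i is
-- [sum(shape[:i]), sum(shape[:i+1])], one comprehension of slice sums (simpler; O(n^2) vs A's O(n)).


-- ===== PORT A =====
-- for index, data in enumerate(shape): the subscript index-1 into b is always in range during
-- the loop (index = len(b) and index ≥ 1 on that branch), so pyGetD is exact here.
def createIterableShape (shape : List Int) : List (List Int) :=
  (PySem.List.enumerate shape 0).foldl
    (fun (b : List (List Int)) (p : Int × Int) =>
      if p.1 = 0 then
        b ++ [[0, p.2]]
      else
        b ++ [[PySem.List.pyGetD (PySem.List.pyGetD b (p.1 - 1) []) 1 0,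
               PySem.List.pyGetD (PySem.List.pyGetD b (p.1 - 1) []) 1 0 + p.2]])
    []

-- ===== PORT B =====
-- [[sum(shape[:i]), sum(shape[:i+1])] for i in range(len(shape))]
def createIterableShape_alt (shape : List Int) : List (List Int) :=
  (PySem.List.pyRange 0 (shape.length : Int) 1).map
    (fun i => [(PySem.List.slice shape none (some i)).sum,
               (PySem.List.slice shape none (some (i + 1))).sum])

-- ===== PRECONDITION & SPEC =====
def Spec_createIterableShape (shape : List Int) (out : List (List Int)) : Prop := out = createIterableShape_alt shape
instance (shape : List Int) (out : List (List Int)) : Decidable (Spec_createIterableShape shape out) := by unfold Spec_createIterableShape; infer_instance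

-- ===== CLAIM =====
def Claim_equal_createIterableShape : Prop := ∀ (shape : List Int), Dom_createIterableShape shape → Spec_createIterableShape shape (createIterableShape shape)

-- ===== LEMMAS AND PROOFS =====

/-- Reference shape: the list of [t, t+d] pairs starting from running total `t`. -/
def pvPairs : List Int → Int → List (List Int)
  | [], _ => []
  | d :: rest, t => [t, t + d] :: pvPairs rest (t + d)

/-- A-side loop invariant. -/
lemma pvA_loop (rest : List Int) : ∀ (b' : List (List Int)) (s t : Int),
    (PySem.List.enumerate rest ((b' ++ [[s, t]]).length : Int)).foldl
      (fun (b : List (List Int)) (p : Int × Int) =>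
        if p.1 = 0 then
          b ++ [[0, p.2]]
        else
          b ++ [[PySem.List.pyGetD (PySem.List.pyGetD b (p.1 - 1) []) 1 0,
                 PySem.List.pyGetD (PySem.List.pyGetD b (p.1 - 1) []) 1 0 + p.2]])
      (b' ++ [[s, t]])
    = (b' ++ [[s, t]]) ++ pvPairs rest t := by
  induction rest with
  | nil => intro b' s t; simp [PySem.List.enumerate_nil, pvPairs]
  | cons d rest ih =>
    intro b' s t
    rw [PySem.List.enumerate_cons, List.foldl_cons]
    have hlen : ((b' ++ [[s, t]]).length : Int) ≠ 0 := by
      simp [List.length_append]; omega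
    rw [if_neg hlen]
    have hget : PySem.List.pyGetD (b' ++ [[s, t]]) (((b' ++ [[s, t]]).length : Int) - 1) [] = [s, t] := by
      have : (((b' ++ [[s, t]]).length : Int) - 1) = ((b'.length : Int)) := by
        simp [List.length_append]
      rw [this, PySem.List.pyGetD_natCast]
      simp
    rw [hget]
    have h1 : PySem.List.pyGetD ([s, t] : List Int) 1 0 = t := by
      rw [show (1 : Int) = ((1 : Nat) : Int) by norm_num, PySem.List.pyGetD_natCast]
      rfl
    rw [h1]
    have := ih (b' ++ [[s, t]]) t (t + d)
    have hlen2 : ((b' ++ [[s, t]] ++ [[t, t + d]]).length : Int)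
        = ((b' ++ [[s, t]]).length : Int) + 1 := by
      simp [List.length_append]; omega
    rw [hlen2] at this
    simpa [pvPairs] using this

/-- A computes the reference pairs. -/
lemma pvA_eq (shape : List Int) : createIterableShape shape = pvPairs shape 0 := by
  cases shape with
  | nil => rfl
  | cons d rest =>
    unfold createIterableShape
    rw [PySem.List.enumerate_cons, List.foldl_cons]
    rw [if_pos rfl]
    have := pvA_loop rest [] 0 d
    simpa [pvPairs] using this

/-- The closed-form table equals the reference pairs, generalised over the base offset. -/
lemma pvTable_eq (shape : List Int) : ∀ (t : Int),
    (List.range shape.length).map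
      (fun k => [t + (shape.take k).sum, t + (shape.take (k + 1)).sum])
    = pvPairs shape t := by
  induction shape with
  | nil => intro t; simp [pvPairs]
  | cons d rest ih =>
    intro t
    simp only [List.length_cons]
    rw [List.range_succ_eq_map, List.map_cons, List.map_map]
    have h0 : [t + (((d :: rest).take 0).sum), t + (((d :: rest).take (0 + 1)).sum)]
        = [t, t + d] := by simp
    rw [h0]
    have hcomp : ((fun k => [t + ((d :: rest).take k).sum, t + ((d :: rest).take (k + 1)).sum]) ∘ Nat.succ)
        = (fun k => [(t + d) + (rest.take k).sum, (t + d) + (rest.take (k + 1)).sum]) := by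
      funext k
      simp [List.take_succ_cons]
      constructor <;> ring
    rw [hcomp, ih (t + d)]
    rfl

/-- B computes the reference pairs. -/
lemma pvB_eq (shape : List Int) : createIterableShape_alt shape = pvPairs shape 0 := by
  unfold createIterableShape_alt
  rw [PySem.List.pyRange_one]
  rw [List.map_map]
  have : ((fun i => [(PySem.List.slice shape none (some i)).sum,
                     (PySem.List.slice shape none (some (i + 1))).sum]) ∘ (fun k : Nat => (0 : Int) + k))
      = (fun k : Nat => [(0 : Int) + (shape.take k).sum, (0 : Int) + (shape.take (k + 1)).sum]) := by
    funext k
    simp only [Function.comp_apply]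
    have h1 : ((0 : Int) + (k : Int)) = ((k : Nat) : Int) := by ring
    rw [h1]
    have h2 : ((k : Int) + 1) = (((k + 1 : Nat)) : Int) := by push_cast; ring
    rw [h2, PySem.List.slice_to_natCast, PySem.List.slice_to_natCast]
    simp
  rw [this]
  have hlen : (((shape.length : Int) - 0).toNat) = shape.length := by omega
  rw [hlen]
  exact pvTable_eq shape 0

-- ===== VERDICT =====
theorem createIterableShape_spec : Claim_equal_createIterableShape := by
  intro shape _
  unfold Spec_createIterableShape
  rw [pvA_eq, pvB_eq]
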